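-- pv_equiv track=rewrite | github.com/agandar1/GomokuAI | oscar_Gomoku/lib/structure_manager.py | lead_parser
-- ===== SOURCE A (Python) =====
-- def lead_parser(my_leading, op_leading):
--     remove_set = []
--     for lead in my_leading:
--         for lead_reaction in my_leading[lead]:
--             if lead_reaction in op_leading:
--                 remove_set.append(lead)
--                 break
--     return set(my_leading) - set(remove_set)
-- ===== SOURCE B (Python) =====
-- def lead_parser(my_leading, op_leading):
--     index = {}
--     for lead in my_leading:
--         for reaction in my_leading[lead]:
--             index.setdefault(reaction, set()).add(lead)
--     remove = set()
--     for op in op_leading: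
--         if op in index:
--             remove |= index[op]
--     return set(my_leading) - remove
-- ===== Notes on version B (the rewrite author's own statement) =====
-- stated objective: alternative
-- what changed: B builds a reaction-to-leads inverted index in one pass over my_leading and then probes it once per opponent key to collect the removal set, instead of A's per-lead scan testing every reaction against op_leading.
import Mathlib
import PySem

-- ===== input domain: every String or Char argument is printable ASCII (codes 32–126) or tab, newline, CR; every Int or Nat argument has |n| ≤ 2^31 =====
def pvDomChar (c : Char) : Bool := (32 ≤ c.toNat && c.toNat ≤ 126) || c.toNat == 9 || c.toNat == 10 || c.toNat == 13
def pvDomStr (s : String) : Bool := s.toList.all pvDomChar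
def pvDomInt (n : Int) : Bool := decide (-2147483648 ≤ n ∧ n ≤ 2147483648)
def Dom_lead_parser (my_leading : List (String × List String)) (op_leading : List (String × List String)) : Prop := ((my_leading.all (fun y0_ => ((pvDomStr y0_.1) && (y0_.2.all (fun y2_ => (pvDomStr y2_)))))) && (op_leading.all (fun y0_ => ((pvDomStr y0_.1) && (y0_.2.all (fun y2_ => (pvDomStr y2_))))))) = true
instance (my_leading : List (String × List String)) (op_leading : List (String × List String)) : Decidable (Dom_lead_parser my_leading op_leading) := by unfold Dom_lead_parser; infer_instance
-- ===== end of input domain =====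

-- B replaces A's per-reaction membership rescans with a reaction→leads inverted index built
-- in one pass, probed once per opponent key (objective: alternative decomposition; same set result).

-- ===== PORT A =====
-- inner 'for lead_reaction in my_leading[lead]: if lead_reaction in op_leading: append; break'
def leadInnerA (od : PySem.Dict String (List String)) (remove_set : List String)
    (lead : String) : List String → List String
  | [] => remove_set
  | r :: rest =>
    if od.contains r then remove_set ++ [lead] else leadInnerA od remove_set lead rest

def lead_parser (my_leading : List (String × List String)) (op_leading : List (String × List String)) : List String :=
  let md := PySem.Dict.ofList my_leading
  let od := PySem.Dict.ofList op_leading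
  let remove_set := md.keys.foldl (fun rs lead => leadInnerA od rs lead (md.getD lead [])) []
  PySem.Set.diff (PySem.Set.ofList md.keys) (PySem.Set.ofList remove_set)

-- ===== PORT B =====
def lead_parser_alt (my_leading : List (String × List String)) (op_leading : List (String × List String)) : List String :=
  let md := PySem.Dict.ofList my_leading
  let od := PySem.Dict.ofList op_leading
  -- index = {}; for lead in my_leading: for reaction in my_leading[lead]: index.setdefault(reaction, set()).add(lead)
  let index : PySem.Dict String (PySem.Set String) :=
    md.keys.foldl (fun d lead =>
      (md.getD lead []).foldl (fun d r => d.modify r PySem.Set.empty (fun s => PySem.Set.add s lead)) d)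
      PySem.Dict.empty
  -- remove = set(); for op in op_leading: if op in index: remove |= index[op]
  let remove := od.keys.foldl (fun s k =>
      if index.contains k then PySem.Set.update s (index.getD k PySem.Set.empty) else s)
    PySem.Set.empty
  PySem.Set.diff (PySem.Set.ofList md.keys) remove

-- ===== PRECONDITION & SPEC =====
def Spec_lead_parser (my_leading : List (String × List String)) (op_leading : List (String × List String)) (out : List String) : Prop := out = lead_parser_alt my_leading op_leading
instance (my_leading : List (String × List String)) (op_leading : List (String × List String)) (out : List String) : Decidable (Spec_lead_parser my_leading op_leading out) := by unfold Spec_lead_parser; infer_instance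

-- ===== CLAIM (what is proved, stated in full; the proofs are below) =====
def Claim_equal_lead_parser : Prop := ∀ (my_leading : List (String × List String)) (op_leading : List (String × List String)), Dom_lead_parser my_leading op_leading → Spec_lead_parser my_leading op_leading (lead_parser my_leading op_leading)

-- ===== LEMMAS AND PROOFS =====

-- A's inner loop appends lead iff some reaction is an opponent key
theorem leadInnerA_eq (od : PySem.Dict String (List String)) (rs : List String)
    (lead : String) (vals : List String) :
    leadInnerA od rs lead vals = if vals.any od.contains then rs ++ [lead] else rs := by
  induction vals with
  | nil => simp [leadInnerA]
  | cons r rest ih =>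
    simp only [leadInnerA, List.any_cons]
    by_cases h : od.contains r = true <;> simp [h, ih]

-- membership in A's remove_set accumulator
theorem memA (od md : PySem.Dict String (List String)) (keys : List String)
    (rs : List String) (x : String) :
    x ∈ keys.foldl (fun rs lead => leadInnerA od rs lead (md.getD lead [])) rs ↔
      x ∈ rs ∨ ∃ lead ∈ keys, x = lead ∧ ∃ r ∈ md.getD lead [], od.contains r = true := by
  induction keys generalizing rs with
  | nil => simp
  | cons k ks ih =>
    rw [List.foldl_cons, leadInnerA_eq, ih]
    by_cases h : (md.getD k []).any od.contains = true
    · rw [if_pos h, List.any_eq_true] at *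
      simp only [List.mem_append, List.mem_cons]
      constructor
      · rintro ((hx | (rfl | hx)) | ⟨l, hl, hxl, hr⟩)
        · exact Or.inl hx
        · exact Or.inr ⟨x, Or.inl rfl, rfl, h⟩
        · exact absurd hx (List.not_mem_nil)
        · exact Or.inr ⟨l, Or.inr hl, hxl, hr⟩
      · rintro (hx | ⟨l, (rfl | hl), hxl, hr⟩)
        · exact Or.inl (Or.inl hx)
        · exact Or.inl (Or.inr (Or.inl hxl))
        · exact Or.inr ⟨l, hl, hxl, hr⟩
    · rw [if_neg h, List.any_eq_true] at *
      simp only [List.mem_cons]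
      constructor
      · rintro (hx | ⟨l, hl, hxl, hr⟩)
        · exact Or.inl hx
        · exact Or.inr ⟨l, Or.inr hl, hxl, hr⟩
      · rintro (hx | ⟨l, (rfl | hl), hxl, hr⟩)
        · exact Or.inl hx
        · exact absurd hr h
        · exact Or.inr ⟨l, hl, hxl, hr⟩

-- membership in the inverted index entry for r, after the inner reaction loop
theorem memIdxInner (vals : List String) (d : PySem.Dict String (PySem.Set String))
    (lead r x : String) :
    x ∈ (vals.foldl (fun d r' => d.modify r' PySem.Set.empty (fun s => PySem.Set.add s lead)) d).getD r PySem.Set.empty ↔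
      x ∈ d.getD r PySem.Set.empty ∨ (x = lead ∧ r ∈ vals) := by
  induction vals generalizing d with
  | nil => simp
  | cons v vs ih =>
    rw [List.foldl_cons, ih, PySem.Dict.getD_modify]
    by_cases h : r = v
    · rw [if_pos h]
      simp only [PySem.Set.mem_add, List.mem_cons, h]
      tauto
    · rw [if_neg h]
      simp only [List.mem_cons]
      constructor
      · rintro (hx | ⟨rfl, hr⟩)
        · exact Or.inl hx
        · exact Or.inr ⟨rfl, Or.inr hr⟩
      · rintro (hx | ⟨rfl, (hv | hr)⟩)
        · exact Or.inl hx
        · exact absurd hv h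
        · exact Or.inr ⟨rfl, hr⟩

-- membership in the whole index entry for r
theorem memIdx (md : PySem.Dict String (List String)) (keys : List String)
    (d : PySem.Dict String (PySem.Set String)) (r x : String) :
    x ∈ (keys.foldl (fun d lead =>
        (md.getD lead []).foldl (fun d r' => d.modify r' PySem.Set.empty (fun s => PySem.Set.add s lead)) d) d).getD r PySem.Set.empty ↔
      x ∈ d.getD r PySem.Set.empty ∨ ∃ lead ∈ keys, x = lead ∧ r ∈ md.getD lead [] := by
  induction keys generalizing d with
  | nil => simp
  | cons k ks ih =>
    rw [List.foldl_cons, ih, memIdxInner]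
    constructor
    · rintro ((hx | hx) | ⟨l, hl, hxl, hr⟩)
      · exact Or.inl hx
      · exact Or.inr ⟨k, List.mem_cons_self, hx.1, hx.2⟩
      · exact Or.inr ⟨l, List.mem_cons_of_mem _ hl, hxl, hr⟩
    · rintro (hx | ⟨l, hl, hxl, hr⟩)
      · exact Or.inl (Or.inl hx)
      · rcases List.mem_cons.mp hl with rfl | hl
        · exact Or.inl (Or.inr ⟨hxl, hr⟩)
        · exact Or.inr ⟨l, hl, hxl, hr⟩

-- membership in B's remove accumulator
theorem memB (idx : PySem.Dict String (PySem.Set String)) (keys : List String)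
    (s : PySem.Set String) (x : String) :
    x ∈ keys.foldl (fun s k => if idx.contains k then PySem.Set.update s (idx.getD k PySem.Set.empty) else s) s ↔
      x ∈ s ∨ ∃ k ∈ keys, x ∈ idx.getD k PySem.Set.empty := by
  induction keys generalizing s with
  | nil => simp
  | cons k ks ih =>
    rw [List.foldl_cons]
    by_cases h : idx.contains k = true
    · rw [if_pos h, ih]
      simp only [PySem.Set.mem_update, List.mem_cons]
      constructor
      · rintro ((hx | hx) | ⟨k', hk', hxk'⟩)
        · exact Or.inl hx
        · exact Or.inr ⟨k, Or.inl rfl, hx⟩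
        · exact Or.inr ⟨k', Or.inr hk', hxk'⟩
      · rintro (hx | ⟨k', (rfl | hk'), hxk'⟩)
        · exact Or.inl (Or.inl hx)
        · exact Or.inl (Or.inr hxk')
        · exact Or.inr ⟨k', hk', hxk'⟩
    · have hd : idx.getD k PySem.Set.empty = PySem.Set.empty :=
        PySem.Dict.getD_of_not_contains idx _ (by simpa using h)
      rw [if_neg h, ih]
      simp only [List.mem_cons]
      constructor
      · rintro (hx | ⟨k', hk', hxk'⟩)
        · exact Or.inl hx
        · exact Or.inr ⟨k', Or.inr hk', hxk'⟩
      · rintro (hx | ⟨k', (rfl | hk'), hxk'⟩)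
        · exact Or.inl hx
        · rw [hd] at hxk'; exact absurd hxk' (List.not_mem_nil)
        · exact Or.inr ⟨k', hk', hxk'⟩

-- set difference depends on the right operand only through membership
theorem diff_congr (s t t' : PySem.Set String) (h : ∀ x, x ∈ t ↔ x ∈ t') :
    PySem.Set.diff s t = PySem.Set.diff s t' := by
  unfold PySem.Set.diff
  apply List.filter_congr
  intro x _
  have := h x
  by_cases hx : x ∈ t'
  · rw [(PySem.Set.contains_iff t x).mpr (this.mpr hx), (PySem.Set.contains_iff t' x).mpr hx]
  · have hnt : ¬ x ∈ t := fun hh => hx (this.mp hh)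
    rw [show PySem.Set.contains t x = false by
          cases hc : PySem.Set.contains t x
          · rfl
          · exact absurd ((PySem.Set.contains_iff t x).mp hc) hnt,
        show PySem.Set.contains t' x = false by
          cases hc : PySem.Set.contains t' x
          · rfl
          · exact absurd ((PySem.Set.contains_iff t' x).mp hc) hx]

-- ===== VERDICT (by name: the statement is the Claim_ definition above) =====
theorem lead_parser_spec : Claim_equal_lead_parser := by
  intro my op _
  unfold Spec_lead_parser lead_parser lead_parser_alt
  apply diff_congr
  intro x
  rw [PySem.Set.mem_ofList, memA, memB]
  simp only [List.not_mem_nil, false_or]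
  constructor
  · rintro ⟨l, hl, hxl, r, hr, hrc⟩
    refine Or.inr ⟨r, (PySem.Dict.contains_iff_mem_keys _ _).mp hrc, ?_⟩
    rw [memIdx]
    exact Or.inr ⟨l, hl, hxl, hr⟩
  · rintro (hx | ⟨r, hrk, hx⟩)
    · simp [PySem.Set.empty] at hx
    · rw [memIdx] at hx
      rcases hx with hx | ⟨l, hl, hxl, hr⟩
      · simp [PySem.Dict.getD_empty, PySem.Set.empty] at hx
      · exact ⟨l, hl, hxl, r, hr, (PySem.Dict.contains_iff_mem_keys _ _).mpr hrk⟩
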